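-- pv_equiv track=rewrite | github.com/dawoodaijaz97/Leetcode | maximize-alternating-sum-using-swaps/solution.py | solve
-- ===== SOURCE A (Python) =====
-- def solve(nums: list[int], swaps: list[list[int]]) -> int:
--     # Union-Find data structure to manage connected components
--     parent = list(range(len(nums)))
--
--     def find(x: int) -> int:
--         if parent[x] != x:
--             parent[x] = find(parent[x])
--         return parent[x]
--
--     def union(x: int, y: int) -> None:
--         root_x = find(x)
--         root_y = find(y)
--         if root_x != root_y:
--             parent[root_x] = root_y
--
--     # Union all indices that can be swapped
--     for p, q in swaps:
--         union(p, q)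
--
--     # Group elements by their connected component root
--     from collections import defaultdict
--     groups = defaultdict(list)
--     for i, num in enumerate(nums):
--         groups[find(i)].append(num)
--
--     # Calculate the maximum alternating sum for each group
--     max_alternating_sum = 0
--     for group in groups.values():
--         group.sort(reverse=True)
--         # Add all odd-indexed elements (1-based) and subtract even-indexed elements
--         max_alternating_sum += sum(group[i] for i in range(0, len(group), 2))
--         if len(group) > 1:
--             max_alternating_sum -= sum(group[i] for i in range(1, len(group), 2))
--
--     return max_alternating_sum
-- ===== SOURCE B (Python) =====
-- def solve(nums: list[int], swaps: list[list[int]]) -> int: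
--     # Label-propagation: keep a component label per index; each swap merges
--     # two label classes by rewriting one label to the other. No trees, no
--     # recursion, no find/union machinery.
--     n = len(nums)
--     labels = list(range(n))
--     for p, q in swaps:
--         lp, lq = labels[p], labels[q]
--         if lp != lq:
--             labels = [lq if l == lp else l for l in labels]
--     groups = {}
--     for lab, num in zip(labels, nums):
--         groups[lab] = groups.get(lab, []) + [num]
--     total = 0
--     for g in groups.values():
--         sign = 1
--         for v in sorted(g, reverse=True):
--             total += sign * v
--             sign = -sign
--     return total
-- ===== Notes on version B (the rewrite author's own statement) =====
-- stated objective: alternative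
-- what changed: Replaces A's recursive union-find (parent array, path compression, find/union) by label propagation: each index keeps a component label and a swap merges two classes by rewriting one label into the other; grouping then reads labels directly instead of calling find, and each group's alternating sum is taken by a single signed fold over the descending sort instead of two stride-2 index comprehensions.
import Mathlib
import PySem

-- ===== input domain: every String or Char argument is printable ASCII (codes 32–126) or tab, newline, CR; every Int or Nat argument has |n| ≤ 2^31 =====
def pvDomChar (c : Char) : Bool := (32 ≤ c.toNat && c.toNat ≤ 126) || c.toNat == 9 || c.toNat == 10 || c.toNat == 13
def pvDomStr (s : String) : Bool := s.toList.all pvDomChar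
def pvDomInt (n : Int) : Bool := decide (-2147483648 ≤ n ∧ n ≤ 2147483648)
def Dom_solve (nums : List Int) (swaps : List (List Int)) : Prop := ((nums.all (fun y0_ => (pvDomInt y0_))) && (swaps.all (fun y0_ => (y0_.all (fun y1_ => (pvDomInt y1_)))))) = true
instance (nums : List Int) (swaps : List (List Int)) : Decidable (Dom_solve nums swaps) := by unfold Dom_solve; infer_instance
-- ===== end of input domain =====

-- B replaces A's recursive union-find (parent array, path compression) by label
-- propagation: one component label per index, a swap merges two classes by
-- rewriting one label into the other; objective: alternative (not faster).

-- ===== PORT A =====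
-- find(x) with path compression; the fuel argument only makes the Python
-- recursion structural (it is never exhausted on inputs admitted by Pre_).
def solveFind : Nat → List Int → Int → Int × List Int
  | 0, parent, x => (x, parent)
  | fuel+1, parent, x =>
    let px := PySem.List.pyGetD parent x 0
    if px ≠ x then
      let rec1 := solveFind fuel parent px
      let parent2 := PySem.List.pySetD rec1.2 x rec1.1
      (PySem.List.pyGetD parent2 x 0, parent2)
    else
      (PySem.List.pyGetD parent x 0, parent)

def solveUnion (parent : List Int) (x y : Int) : List Int :=
  let fx := solveFind (parent.length + 1) parent x
  let fy := solveFind (fx.2.length + 1) fx.2 y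
  if fx.1 ≠ fy.1 then PySem.List.pySetD fy.2 fx.1 fy.1 else fy.2

def solve (nums : List Int) (swaps : List (List Int)) : Int :=
  let parent0 : List Int := PySem.List.pyRange 0 nums.length 1
  let parentF := swaps.foldl (fun parent row =>
    match row with
    | [p, q] => solveUnion parent p q
    | _ => parent) parent0
  let st := (PySem.List.enumerate nums).foldl
    (fun (st : List Int × PySem.Dict Int (List Int)) iv =>
      let f := solveFind (st.1.length + 1) st.1 iv.1
      (f.2, st.2.modify f.1 [] (· ++ [iv.2])))
    (parentF, PySem.Dict.empty)
  st.2.values.foldl (fun acc group =>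
    let g := PySem.List.sorted group (fun v => v) true
    let acc1 := acc + ((PySem.List.pyRange 0 (PySem.List.len g) 2).map
      (fun i => PySem.List.pyGetD g i 0)).sum
    if 1 < g.length then
      acc1 - ((PySem.List.pyRange 1 (PySem.List.len g) 2).map
        (fun i => PySem.List.pyGetD g i 0)).sum
    else acc1) 0

-- ===== PORT B =====
def solve_alt (nums : List Int) (swaps : List (List Int)) : Int :=
  let labels := swaps.foldl (fun labels row =>
    match row with
    | p :: rest =>
      match rest with
      | q :: rest2 =>
        match rest2 with
        | [] =>
          let lp := PySem.List.pyGetD labels p 0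
          let lq := PySem.List.pyGetD labels q 0
          if lp ≠ lq then labels.map (fun l => if l = lp then lq else l) else labels
        | _ :: _ => labels
      | [] => labels
    | [] => labels) (PySem.List.pyRange 0 nums.length 1)
  let groups := (labels.zip nums).foldl
    (fun (d : PySem.Dict Int (List Int)) kv => d.insert kv.1 (d.getD kv.1 [] ++ [kv.2]))
    PySem.Dict.empty
  groups.values.foldl (fun acc g =>
    ((PySem.List.sorted g (fun v => v) true).foldl
      (fun (p : Int × Int) v => (p.1 + p.2 * v, -p.2)) (acc, 1)).1) 0

-- ===== PRECONDITION & SPEC =====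
-- Pre_ excludes exactly the inputs on which A raises: a swap row that is not a
-- pair (ValueError on unpacking) or a swap index outside [-len(nums), len(nums))
-- (IndexError).  Negative in-range indices are admitted (Python wraparound).
def Pre_solve (nums : List Int) (swaps : List (List Int)) : Prop :=
  ∀ row ∈ swaps, row.length = 2 ∧ ∀ x ∈ row, PySem.Raise.InRange nums.length x
instance (nums : List Int) (swaps : List (List Int)) : Decidable (Pre_solve nums swaps) := by
  unfold Pre_solve; infer_instance

def pvWitness_solve : List Int × List (List Int) := ([4, -1, 3], [[0, 2]])

def Spec_solve (nums : List Int) (swaps : List (List Int)) (out : Int) : Prop := out = solve_alt nums swaps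
instance (nums : List Int) (swaps : List (List Int)) (out : Int) : Decidable (Spec_solve nums swaps out) := by unfold Spec_solve; infer_instance

-- ===== CLAIM (what is proved, stated in full; the proofs are below) =====
def Claim_equal_solve : Prop := ∀ (nums : List Int) (swaps : List (List Int)), Dom_solve nums swaps → Pre_solve nums swaps → Spec_solve nums swaps (solve nums swaps)

-- ===== LEMMAS AND PROOFS =====

-- Layer 1: iterate facts for a functional graph on [0, n)
theorem iterStable (f : Nat → Nat) (j n s : Nat) (hfix : f (f^[n] j) = f^[n] j) (hs : n ≤ s) :
    f^[s] j = f^[n] j := by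
  obtain ⟨m, rfl⟩ := Nat.exists_eq_add_of_le hs
  rw [Nat.add_comm, Function.iterate_add_apply]
  exact Function.IsFixedPt.iterate hfix m

theorem iterPeriodic (f : Nat → Nat) (y per : Nat) (h : f^[per] y = y) :
    ∀ m, f^[m] y = f^[m % per] y := by
  intro m
  conv_lhs => rw [← Nat.div_add_mod m per, Nat.add_comm]
  rw [Function.iterate_add_apply, Function.iterate_mul]
  rw [Function.IsFixedPt.iterate h (m / per)]

theorem iterMinFix (f : Nat → Nat) (n j : Nat) (hn : 0 < n)
    (hran : ∀ t, f^[t] j < n)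
    (hfix : f (f^[n] j) = f^[n] j) :
    f (f^[n - 1] j) = f^[n - 1] j := by
  have hex : ∃ t, f (f^[t] j) = f^[t] j := ⟨n, hfix⟩
  set s0 := Nat.find hex with hs0def
  have hs0 : f (f^[s0] j) = f^[s0] j := Nat.find_spec hex
  have hs0n : s0 ≤ n := Nat.find_le hfix
  by_cases hlt : s0 ≤ n - 1
  · have := iterStable f j s0 (n - 1) hs0 hlt
    rw [this]; exact hs0
  · -- s0 = n : the n+1 iterates f^[0..n] j would be distinct values < n
    exfalso
    have hs0eq : s0 = n := by omega
    have hinj : Function.Injective (fun t : Fin (n + 1) => (⟨f^[t.1] j, hran t.1⟩ : Fin n)) := by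
      intro t1 t2 heq
      simp only [Fin.mk.injEq] at heq
      by_contra hne
      -- wlog t1 < t2
      rcases Nat.lt_or_ge t1.1 t2.1 with hlt12 | hge
      · -- t1 < t2
        have hper : 0 < t2.1 - t1.1 := by omega
        have hcyc : f^[t2.1 - t1.1] (f^[t1.1] j) = f^[t1.1] j := by
          rw [← Function.iterate_add_apply, Nat.sub_add_cancel (by omega), ← heq]
        have hm : f^[n] j = f^[t1.1 + (n - t1.1) % (t2.1 - t1.1)] j := by
          rw [Nat.add_comm, Function.iterate_add_apply,
            ← iterPeriodic f _ _ hcyc (n - t1.1), ← Function.iterate_add_apply,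
            Nat.sub_add_cancel (by omega)]
        have hidx : t1.1 + (n - t1.1) % (t2.1 - t1.1) < n := by
          have := Nat.mod_lt (n - t1.1) hper
          omega
        have : f (f^[t1.1 + (n - t1.1) % (t2.1 - t1.1)] j) = f^[t1.1 + (n - t1.1) % (t2.1 - t1.1)] j := by
          rw [← hm]; exact hfix
        exact Nat.find_min hex (by omega : t1.1 + (n - t1.1) % (t2.1 - t1.1) < s0) this
      · have hlt21 : t2.1 < t1.1 := by omega
        have hper : 0 < t1.1 - t2.1 := by omega
        have hcyc : f^[t1.1 - t2.1] (f^[t2.1] j) = f^[t2.1] j := by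
          rw [← Function.iterate_add_apply, Nat.sub_add_cancel (by omega), heq]
        have hm : f^[n] j = f^[t2.1 + (n - t2.1) % (t1.1 - t2.1)] j := by
          rw [Nat.add_comm, Function.iterate_add_apply,
            ← iterPeriodic f _ _ hcyc (n - t2.1), ← Function.iterate_add_apply,
            Nat.sub_add_cancel (by omega)]
        have hidx : t2.1 + (n - t2.1) % (t1.1 - t2.1) < n := by
          have := Nat.mod_lt (n - t2.1) hper
          omega
        have : f (f^[t2.1 + (n - t2.1) % (t1.1 - t2.1)] j) = f^[t2.1 + (n - t2.1) % (t1.1 - t2.1)] j := by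
          rw [← hm]; exact hfix
        exact Nat.find_min hex (by omega : t2.1 + (n - t2.1) % (t1.1 - t2.1) < s0) this
    have := Fintype.card_le_of_injective _ hinj
    simp [Fintype.card_fin] at this
-- Layer 2: the parent array as a functional graph
def pstep (parent : List Int) (j : Nat) : Nat := (parent.getD j 0).toNat
def proot (parent : List Int) (j : Nat) : Nat := (pstep parent)^[parent.length] j
def WFp (parent : List Int) : Prop :=
  ∀ j, j < parent.length → ∃ k, k < parent.length ∧ parent.getD j 0 = (k : Int)
def Goodp (parent : List Int) : Prop :=
  WFp parent ∧ ∀ j, j < parent.length → pstep parent (proot parent j) = proot parent j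
def nidx (n : Nat) (x : Int) : Nat := if 0 ≤ x then x.toNat else n - (-x).toNat
def RootsEq (p p' : List Int) : Prop :=
  p'.length = p.length ∧ ∀ j, j < p.length → proot p' j = proot p j

theorem rootsEq_refl (p : List Int) : RootsEq p p := ⟨rfl, fun _ _ => rfl⟩
theorem rootsEq_trans {p q r : List Int} (h1 : RootsEq p q) (h2 : RootsEq q r) : RootsEq p r :=
  ⟨h2.1.trans h1.1, fun j hj => (h2.2 j (h1.1 ▸ hj)).trans (h1.2 j hj)⟩

theorem pstep_lt {parent : List Int} (hwf : WFp parent) {j : Nat} (hj : j < parent.length) :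
    pstep parent j < parent.length := by
  obtain ⟨k, hk, he⟩ := hwf j hj
  unfold pstep
  rw [he]
  simpa using hk

theorem iter_pstep_lt {parent : List Int} (hwf : WFp parent) {j : Nat} (hj : j < parent.length) :
    ∀ t, (pstep parent)^[t] j < parent.length := by
  intro t
  induction t with
  | zero => simpa
  | succ t ih => rw [Function.iterate_succ_apply']; exact pstep_lt hwf ih

theorem proot_lt {parent : List Int} (hwf : WFp parent) {j : Nat} (hj : j < parent.length) :
    proot parent j < parent.length := iter_pstep_lt hwf hj _

theorem proot_of_fix {parent : List Int} {j : Nat} (h : pstep parent j = j) :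
    proot parent j = j :=
  Function.IsFixedPt.iterate h parent.length

theorem proot_pstep {parent : List Int} (good : Goodp parent) {j : Nat} (hj : j < parent.length) :
    proot parent (pstep parent j) = proot parent j := by
  unfold proot
  rw [← Function.iterate_succ_apply, Function.iterate_succ_apply']
  exact good.2 j hj

theorem proot_proot {parent : List Int} (good : Goodp parent) {j : Nat} (hj : j < parent.length) :
    proot parent (proot parent j) = proot parent j :=
  Function.IsFixedPt.iterate (good.2 j hj) parent.length

-- pre-root fix within n-1 steps (used for the link lemma)
theorem proot_fix_pred {parent : List Int} (good : Goodp parent) {j : Nat} (hj : j < parent.length) :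
    pstep parent ((pstep parent)^[parent.length - 1] j) = (pstep parent)^[parent.length - 1] j :=
  iterMinFix (pstep parent) parent.length j (by omega) (fun t => iter_pstep_lt good.1 hj t) (good.2 j hj)
-- Layer 3: index normalisation bridges
theorem nidx_lt {n : Nat} {x : Int} (h : PySem.Raise.InRange n x) : nidx n x < n := by
  obtain ⟨h1, h2⟩ := h
  unfold nidx
  split <;> omega

theorem pyGetD_nidx (xs : List Int) (x : Int) (d : Int) (h : PySem.Raise.InRange xs.length x) :
    PySem.List.pyGetD xs x d = xs.getD (nidx xs.length x) d := by
  obtain ⟨h1, h2⟩ := h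
  unfold nidx
  by_cases hx : 0 ≤ x
  · simp only [PySem.List.pyGetD, PySem.List.pyGet?, PySem.List.pyIdx?, if_pos hx, if_pos h2,
      Option.bind_some, List.getD_eq_getElem?_getD]
  · simp only [PySem.List.pyGetD, PySem.List.pyGet?, PySem.List.pyIdx?, if_neg hx, if_pos h1,
      Option.bind_some, List.getD_eq_getElem?_getD]

theorem pySetD_nidx (xs : List Int) (x : Int) (v : Int) (h : PySem.Raise.InRange xs.length x) :
    PySem.List.pySetD xs x v = xs.set (nidx xs.length x) v := by
  obtain ⟨h1, h2⟩ := h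
  unfold nidx
  by_cases hx : 0 ≤ x
  · simp only [PySem.List.pySetD, PySem.List.pySet?, PySem.List.pyIdx?, if_pos hx, if_pos h2,
      Option.map_some, Option.getD_some]
  · simp only [PySem.List.pySetD, PySem.List.pySet?, PySem.List.pyIdx?, if_neg hx, if_pos h1,
      Option.map_some, Option.getD_some]

theorem pstep_set (p : List Int) (u : Nat) (v : Nat) (hu : u < p.length) :
    ∀ j, pstep (p.set u (v : Int)) j = if j = u then v else pstep p j := by
  intro j
  unfold pstep
  rcases eq_or_ne j u with rfl | hne
  · rw [if_pos rfl]
    rw [List.getD_eq_getElem?_getD, List.getElem?_set, if_pos rfl, if_pos hu]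
    simp
  · rw [if_neg hne, List.getD_eq_getElem?_getD, List.getElem?_set, if_neg (fun h => hne h.symm),
      List.getD_eq_getElem?_getD]

theorem wfp_set {p : List Int} (hwf : WFp p) {u v : Nat} (hu : u < p.length) (hv : v < p.length) :
    WFp (p.set u (v : Int)) := by
  intro j hj
  rw [List.length_set] at hj
  rcases eq_or_ne j u with rfl | hne
  · exact ⟨v, by simpa using hv, by rw [List.getD_eq_getElem?_getD, List.getElem?_set, if_pos rfl, if_pos hu]; simp⟩
  · obtain ⟨k, hk, he⟩ := hwf j hj
    exact ⟨k, by simpa using hk, by rw [List.getD_eq_getElem?_getD, List.getElem?_set,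
      if_neg (fun h => hne h.symm), ← List.getD_eq_getElem?_getD, he]⟩

-- path compression: writing the root of u into cell u changes no root
theorem comp_set (p : List Int) (u : Nat) (hu : u < p.length) (good : Goodp p) :
    Goodp (p.set u ((proot p u : Nat) : Int)) ∧ RootsEq p (p.set u ((proot p u : Nat) : Int)) := by
  have hn : 0 < p.length := by omega
  set p' := p.set u ((proot p u : Nat) : Int) with hp'
  have hlen : p'.length = p.length := by simp [hp']
  have hstep : ∀ j, pstep p' j = if j = u then proot p u else pstep p j :=
    pstep_set p u (proot p u) hu
  have hwf' : WFp p' := by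
    have := wfp_set good.1 hu (proot_lt good.1 hu)
    simpa [hp'] using this
  have hlift : ∀ t j, j < p.length → ∃ s, t ≤ s ∧ (pstep p')^[t] j = (pstep p)^[s] j := by
    intro t
    induction t with
    | zero => intro j hj; exact ⟨0, le_refl _, rfl⟩
    | succ t ih =>
      intro j hj
      obtain ⟨s, hs, he⟩ := ih j hj
      have hy : (pstep p)^[s] j < p.length := iter_pstep_lt good.1 hj s
      rw [Function.iterate_succ_apply', he, hstep]
      by_cases hyu : (pstep p)^[s] j = u
      · refine ⟨p.length + s, by omega, ?_⟩
        rw [if_pos hyu, Function.iterate_add_apply, hyu]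
        rfl
      · exact ⟨s + 1, by omega, by rw [if_neg hyu, Function.iterate_succ_apply']⟩
  have hroots : ∀ j, j < p.length → proot p' j = proot p j := by
    intro j hj
    obtain ⟨s, hs, he⟩ := hlift p.length j hj
    unfold proot
    rw [hlen, he, iterStable (pstep p) j p.length s (good.2 j hj) hs]
  refine ⟨⟨hwf', ?_⟩, hlen, hroots⟩
  intro j hj'
  have hj : j < p.length := hlen ▸ hj'
  rw [hroots j hj, hstep]
  by_cases hru : proot p j = u
  · rw [if_pos hru, ← hru, proot_proot good hj, hru]
  · rw [if_neg hru]
    exact good.2 j hj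

-- linking two distinct roots merges exactly the two classes
theorem link_set (p : List Int) (a b : Nat) (ha : a < p.length) (hb : b < p.length)
    (good : Goodp p) (hfa : pstep p a = a) (hfb : pstep p b = b) (hab : a ≠ b) :
    Goodp (p.set a ((b : Nat) : Int)) ∧ (p.set a ((b : Nat) : Int)).length = p.length ∧
    ∀ j, j < p.length → proot (p.set a ((b : Nat) : Int)) j =
      if proot p j = a then b else proot p j := by
  have hn : 0 < p.length := by omega
  set p' := p.set a ((b : Nat) : Int) with hp'
  have hlen : p'.length = p.length := by simp [hp']
  have hstep : ∀ j, pstep p' j = if j = a then b else pstep p j := pstep_set p a b ha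
  have hwf' : WFp p' := by
    have := wfp_set good.1 ha hb
    simpa [hp'] using this
  have hfix'b : pstep p' b = b := by rw [hstep, if_neg (Ne.symm hab)]; exact hfb
  -- roots after the link
  have hmain : ∀ j, j < p.length →
      proot p' j = (if proot p j = a then b else proot p j) := by
    intro j hj
    by_cases hja : proot p j = a
    · -- the chain of j reaches a within p.length - 1 steps, then goes to b and stays
      rw [if_pos hja]
      have hpre : pstep p ((pstep p)^[p.length - 1] j) = (pstep p)^[p.length - 1] j :=
        proot_fix_pred good hj
      have h1 : (pstep p)^[p.length - 1] j = a := by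
        have : (pstep p)^[p.length] j = (pstep p)^[p.length - 1] j := by
          conv_lhs => rw [show p.length = (p.length - 1) + 1 by omega]
          rw [Function.iterate_succ_apply', hpre]
        rw [← hja]; unfold proot; rw [this]
      have hexa : ∃ t, (pstep p)^[t] j = a := ⟨p.length - 1, h1⟩
      set t0 := Nat.find hexa with ht0def
      have ht0 : (pstep p)^[t0] j = a := Nat.find_spec hexa
      have ht0le : t0 ≤ p.length - 1 := Nat.find_le h1
      have hpref : ∀ t, t ≤ t0 → (pstep p')^[t] j = (pstep p)^[t] j := by
        intro t
        induction t with
        | zero => intro _; rfl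
        | succ t ih =>
          intro hle
          rw [Function.iterate_succ_apply', Function.iterate_succ_apply',
            ih (by omega), hstep, if_neg (Nat.find_min hexa (by omega))]
      have hhit : (pstep p')^[t0 + 1] j = b := by
        rw [Function.iterate_succ_apply', hpref t0 (le_refl _), ht0, hstep, if_pos rfl]
      have htail : ∀ m, (pstep p')^[t0 + 1 + m] j = b := by
        intro m
        induction m with
        | zero => exact hhit
        | succ m ih =>
          rw [show t0 + 1 + (m + 1) = (t0 + 1 + m) + 1 by omega,
            Function.iterate_succ_apply', ih, hfix'b]
      unfold proot
      rw [hlen, show p.length = t0 + 1 + (p.length - t0 - 1) by omega]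
      exact htail _
    · rw [if_neg hja]
      have hnever : ∀ t, (pstep p)^[t] j ≠ a := by
        intro t hhit
        apply hja
        by_cases htn : t ≤ p.length
        · have : (pstep p)^[p.length] j = (pstep p)^[p.length - t] ((pstep p)^[t] j) := by
            rw [← Function.iterate_add_apply, Nat.sub_add_cancel htn]
          unfold proot
          rw [this, hhit, Function.IsFixedPt.iterate hfa _]
        · have : (pstep p)^[t] j = (pstep p)^[p.length] j :=
            iterStable (pstep p) j p.length t (good.2 j hj) (by omega)
          unfold proot
          rw [← this, hhit]
      have hsame : ∀ t, (pstep p')^[t] j = (pstep p)^[t] j := by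
        intro t
        induction t with
        | zero => rfl
        | succ t ih =>
          rw [Function.iterate_succ_apply', Function.iterate_succ_apply', ih, hstep,
            if_neg (hnever t)]
      unfold proot
      rw [hlen, hsame]
  refine ⟨⟨hwf', ?_⟩, hlen, hmain⟩
  intro j hj'
  have hj : j < p.length := hlen ▸ hj'
  rw [hmain j hj]
  by_cases hja : proot p j = a
  · rw [if_pos hja, hfix'b]
  · rw [if_neg hja, hstep, if_neg hja]
    exact good.2 j hj
-- Layer 4: specification of find / union
theorem find_spec_nat : ∀ (k fuel : Nat) (parent : List Int) (u : Nat),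
    Goodp parent → u < parent.length →
    pstep parent ((pstep parent)^[k] u) = (pstep parent)^[k] u → k < fuel →
    (solveFind fuel parent ((u : Nat) : Int)).1 = ((proot parent u : Nat) : Int) ∧
    Goodp (solveFind fuel parent (u : Int)).2 ∧ RootsEq parent (solveFind fuel parent (u : Int)).2 := by
  intro k
  induction k with
  | zero =>
    intro fuel parent u good hu hfix hk
    rcases fuel with _ | m
    · omega
    have hfu : pstep parent u = u := hfix
    obtain ⟨c, hc, he⟩ := good.1 u hu
    have hpx : PySem.List.pyGetD parent ((u : Nat) : Int) 0 = ((pstep parent u : Nat) : Int) := by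
      rw [PySem.List.pyGetD_natCast]
      unfold pstep
      rw [he]
      simp
    have hred : solveFind (m+1) parent ((u:Nat):Int) = (((u:Nat):Int), parent) := by
      simp only [solveFind, hpx, hfu]
      rw [if_neg]
      simp
    rw [hred, proot_of_fix hfu]
    exact ⟨rfl, good, rootsEq_refl parent⟩
  | succ k' ih =>
    intro fuel parent u good hu hfix hk
    rcases fuel with _ | m
    · omega
    obtain ⟨c, hc, he⟩ := good.1 u hu
    have hpx : PySem.List.pyGetD parent ((u : Nat) : Int) 0 = ((pstep parent u : Nat) : Int) := by
      rw [PySem.List.pyGetD_natCast]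
      unfold pstep
      rw [he]
      simp
    by_cases hfu : pstep parent u = u
    · have hred : solveFind (m+1) parent ((u:Nat):Int) = (((u:Nat):Int), parent) := by
        simp only [solveFind, hpx, hfu]
        rw [if_neg]
        simp
      rw [hred, proot_of_fix hfu]
      exact ⟨rfl, good, rootsEq_refl parent⟩
    · -- recursive case
      have hrec := ih m parent (pstep parent u) good (pstep_lt good.1 hu)
        (by rw [← Function.iterate_succ_apply]; exact hfix) (by omega)
      set rec1 := solveFind m parent ((pstep parent u : Nat) : Int) with hrec1
      have hr1 : rec1.1 = ((proot parent u : Nat) : Int) := by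
        rw [hrec.1, proot_pstep good hu]
      have hgood1 : Goodp rec1.2 := hrec.2.1
      have hre1 : RootsEq parent rec1.2 := hrec.2.2
      have hulen1 : u < rec1.2.length := by rw [hre1.1]; exact hu
      have hset : PySem.List.pySetD rec1.2 ((u:Nat):Int) rec1.1
          = rec1.2.set u ((proot rec1.2 u : Nat) : Int) := by
        rw [PySem.List.pySetD_natCast, hr1, hre1.2 u hu]
      have hcomp := comp_set rec1.2 u hulen1 hgood1
      have hred : solveFind (m+1) parent ((u:Nat):Int)
          = (PySem.List.pyGetD (rec1.2.set u ((proot rec1.2 u : Nat) : Int)) ((u:Nat):Int) 0,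
             rec1.2.set u ((proot rec1.2 u : Nat) : Int)) := by
        simp only [solveFind, hpx]
        rw [if_pos (by simpa using fun h => hfu (by exact_mod_cast h)), ← hrec1, hset]
      rw [hred]
      have hget : PySem.List.pyGetD (rec1.2.set u ((proot rec1.2 u : Nat) : Int)) ((u:Nat):Int) 0
          = ((proot rec1.2 u : Nat) : Int) := by
        rw [PySem.List.pyGetD_natCast, List.getD_eq_getElem?_getD, List.getElem?_set,
          if_pos rfl, if_pos hulen1]
        simp
      constructor
      · rw [hget, hre1.2 u hu]
      · exact ⟨hcomp.1, rootsEq_trans hre1 hcomp.2⟩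
-- find on an arbitrary in-range Python index
theorem find_spec_int (parent : List Int) (x : Int) (good : Goodp parent)
    (hx : PySem.Raise.InRange parent.length x) :
    (solveFind (parent.length + 1) parent x).1 = ((proot parent (nidx parent.length x) : Nat) : Int) ∧
    Goodp (solveFind (parent.length + 1) parent x).2 ∧
    RootsEq parent (solveFind (parent.length + 1) parent x).2 := by
  have hn : 0 < parent.length := by
    rcases hx with ⟨h1, h2⟩
    omega
  by_cases hxn : 0 ≤ x
  · have hux : x = ((x.toNat : Nat) : Int) := by omega
    have hnid : nidx parent.length x = x.toNat := by unfold nidx; rw [if_pos hxn]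
    have hlt : x.toNat < parent.length := by
      rcases hx with ⟨h1, h2⟩; omega
    rw [hnid, hux]
    exact find_spec_nat parent.length (parent.length + 1) parent x.toNat good hlt
      (good.2 x.toNat hlt) (by omega)
  · -- negative in-range index: first step reads cell (nidx parent.length x)
    set i := nidx parent.length x with hidef
    have hilt : i < parent.length := nidx_lt hx
    obtain ⟨c, hc, he⟩ := good.1 i hilt
    have hpx : PySem.List.pyGetD parent x 0 = ((pstep parent i : Nat) : Int) := by
      rw [pyGetD_nidx parent x 0 hx, ← hidef]
      unfold pstep
      rw [he]
      simp
    have hpxx : PySem.List.pyGetD parent x 0 ≠ x := by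
      rw [hpx]; omega
    have hrec := find_spec_nat (parent.length - 1) parent.length parent (pstep parent i) good
      (pstep_lt good.1 hilt)
      (by
        rw [← Function.iterate_succ_apply, show (parent.length - 1).succ = parent.length by omega]
        exact good.2 i hilt) (by omega)
    set rec1 := solveFind parent.length parent ((pstep parent i : Nat) : Int) with hrec1
    have hr1 : rec1.1 = ((proot parent i : Nat) : Int) := by
      rw [hrec.1, proot_pstep good hilt]
    have hgood1 : Goodp rec1.2 := hrec.2.1
    have hre1 : RootsEq parent rec1.2 := hrec.2.2
    have hilen1 : i < rec1.2.length := by rw [hre1.1]; exact hilt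
    have hxlen1 : PySem.Raise.InRange rec1.2.length x := by rw [hre1.1]; exact hx
    have hset : PySem.List.pySetD rec1.2 x rec1.1
        = rec1.2.set i ((proot rec1.2 i : Nat) : Int) := by
      rw [pySetD_nidx rec1.2 x rec1.1 hxlen1, hr1, hre1.2 i hilt, hre1.1, ← hidef]
    have hcomp := comp_set rec1.2 i hilen1 hgood1
    have hred : solveFind (parent.length + 1) parent x
        = (PySem.List.pyGetD (rec1.2.set i ((proot rec1.2 i : Nat) : Int)) x 0,
           rec1.2.set i ((proot rec1.2 i : Nat) : Int)) := by
      simp only [solveFind]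
      rw [if_pos hpxx, hpx, ← hrec1, hset]
    rw [hred]
    have hxlen2 : PySem.Raise.InRange (rec1.2.set i ((proot rec1.2 i : Nat) : Int)).length x := by
      rw [List.length_set]; exact hxlen1
    have hget : PySem.List.pyGetD (rec1.2.set i ((proot rec1.2 i : Nat) : Int)) x 0
        = ((proot rec1.2 i : Nat) : Int) := by
      rw [pyGetD_nidx _ x 0 hxlen2]
      have hnm : nidx (rec1.2.set i ((proot rec1.2 i : Nat) : Int)).length x = i := by
        rw [List.length_set, hre1.1]
      rw [hnm, List.getD_eq_getElem?_getD, List.getElem?_set, if_pos rfl, if_pos hilen1]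
      simp
    constructor
    · rw [hget, hre1.2 i hilt]
    · exact ⟨hcomp.1, rootsEq_trans hre1 hcomp.2⟩

-- union: the two classes merge, everything else is untouched
theorem union_spec (parent : List Int) (x y : Int) (good : Goodp parent)
    (hx : PySem.Raise.InRange parent.length x) (hy : PySem.Raise.InRange parent.length y) :
    Goodp (solveUnion parent x y) ∧ (solveUnion parent x y).length = parent.length ∧
    ∀ j, j < parent.length → proot (solveUnion parent x y) j =
      if proot parent j = proot parent (nidx parent.length x)
      then proot parent (nidx parent.length y) else proot parent j := by
  have hfx := find_spec_int parent x good hx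
  set fx := solveFind (parent.length + 1) parent x with hfxdef
  have hlen1 : fx.2.length = parent.length := hfx.2.2.1
  have hy1 : PySem.Raise.InRange fx.2.length y := by rw [hlen1]; exact hy
  have hfy := find_spec_int fx.2 y hfx.2.1 hy1
  set fy := solveFind (fx.2.length + 1) fx.2 y with hfydef
  have hlen2 : fy.2.length = fx.2.length := hfy.2.2.1
  set ix := nidx parent.length x with hixdef
  set iy := nidx parent.length y with hiydef
  have hixlt : ix < parent.length := nidx_lt hx
  have hiylt : iy < parent.length := nidx_lt hy
  set rx := proot parent ix with hrxdef
  set ry := proot parent iy with hrydef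
  have hrxlt : rx < parent.length := proot_lt good.1 hixlt
  have hrylt : ry < parent.length := proot_lt good.1 hiylt
  have hfx1 : fx.1 = ((rx : Nat) : Int) := hfx.1
  have hfy1 : fy.1 = ((ry : Nat) : Int) := by
    rw [hfy.1]
    have : nidx fx.2.length y = iy := by rw [hlen1]
    rw [this, hfx.2.2.2 iy hiylt]
  have hryfy : ∀ j, j < parent.length → proot fy.2 j = proot parent j := by
    intro j hj
    rw [hfy.2.2.2 j (by rw [hlen1]; exact hj), hfx.2.2.2 j hj]
  have hgood2 : Goodp fy.2 := hfy.2.1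
  have hlen21 : fy.2.length = parent.length := by rw [hlen2, hlen1]
  simp only [solveUnion]
  rw [← hfxdef, ← hfydef, hfx1, hfy1]
  by_cases hne : rx = ry
  · rw [if_neg (by simp [hne])]
    refine ⟨hgood2, hlen21, ?_⟩
    intro j hj
    rw [hryfy j hj]
    rcases eq_or_ne (proot parent j) rx with h | h
    · rw [if_pos h, ← hne, h]
    · rw [if_neg h]
  · rw [if_pos (by simp [hne])]
    have hsetd : PySem.List.pySetD fy.2 ((rx : Nat) : Int) ((ry : Nat) : Int)
        = fy.2.set rx ((ry : Nat) : Int) := by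
      rw [PySem.List.pySetD_natCast]
    rw [hsetd]
    have hrxlt2 : rx < fy.2.length := by rw [hlen21]; exact hrxlt
    have hrylt2 : ry < fy.2.length := by rw [hlen21]; exact hrylt
    have hfixa : pstep fy.2 rx = rx := by
      have h1 : proot fy.2 ix = rx := by rw [hryfy ix hixlt]
      have := hgood2.2 ix (by rw [hlen21]; exact hixlt)
      rw [h1] at this
      exact this
    have hfixb : pstep fy.2 ry = ry := by
      have h1 : proot fy.2 iy = ry := by rw [hryfy iy hiylt]
      have := hgood2.2 iy (by rw [hlen21]; exact hiylt)
      rw [h1] at this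
      exact this
    have hlink := link_set fy.2 rx ry hrxlt2 hrylt2 hgood2 hfixa hfixb hne
    refine ⟨hlink.1, by rw [hlink.2.1, hlen21], ?_⟩
    intro j hj
    rw [hlink.2.2 j (by rw [hlen21]; exact hj), hryfy j hj]
-- Layer 6: invariant tying A's roots to B's labels across the swaps loop
def InvPL (n : Nat) (parent labels : List Int) : Prop :=
  Goodp parent ∧ parent.length = n ∧ labels.length = n ∧
  ∀ i j, i < n → j < n →
    (proot parent i = proot parent j ↔ labels.getD i 0 = labels.getD j 0)

theorem merge_iff {α β : Type} [DecidableEq α] [DecidableEq β]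
    (ra : α) (lp lq : β) (Ri Rj rb : α) (Li Lj : β)
    (h : Ri = Rj ↔ Li = Lj) (hpi : Ri = ra ↔ Li = lp) (hqi : Ri = rb ↔ Li = lq)
    (hpj : Rj = ra ↔ Lj = lp) (hqj : Rj = rb ↔ Lj = lq) :
    ((if Ri = ra then rb else Ri) = (if Rj = ra then rb else Rj)) ↔
      ((if Li = lp then lq else Li) = (if Lj = lp then lq else Lj)) := by
  by_cases h1 : Ri = ra
  · have hl1 : Li = lp := hpi.mp h1
    by_cases h2 : Rj = ra
    · simp [h1, h2, hl1, hpj.mp h2]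
    · have hl2 : Lj ≠ lp := fun hh => h2 (hpj.mpr hh)
      rw [if_pos h1, if_neg h2, if_pos hl1, if_neg hl2]
      constructor
      · intro hh; exact (hqj.mp hh.symm).symm
      · intro hh; exact (hqj.mpr hh.symm).symm
  · have hl1 : Li ≠ lp := fun hh => h1 (hpi.mpr hh)
    by_cases h2 : Rj = ra
    · have hl2 : Lj = lp := hpj.mp h2
      rw [if_neg h1, if_pos h2, if_neg hl1, if_pos hl2]
      exact hqi
    · have hl2 : Lj ≠ lp := fun hh => h2 (hpj.mpr hh)
      rw [if_neg h1, if_neg h2, if_neg hl1, if_neg hl2]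
      exact h

theorem labels_map_getD (labels : List Int) (lp lq : Int) (j : Nat) (hj : j < labels.length) :
    (labels.map (fun l => if l = lp then lq else l)).getD j 0
      = if labels.getD j 0 = lp then lq else labels.getD j 0 := by
  have hj' : j < (labels.map (fun l => if l = lp then lq else l)).length := by simpa
  rw [List.getD_eq_getElem _ _ hj', List.getD_eq_getElem _ _ hj, List.getElem_map]

theorem inv_step (n : Nat) (parent labels : List Int) (p q : Int)
    (inv : InvPL n parent labels) (hp : PySem.Raise.InRange n p) (hq : PySem.Raise.InRange n q) :
    InvPL n (solveUnion parent p q)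
      (if PySem.List.pyGetD labels p 0 ≠ PySem.List.pyGetD labels q 0
       then labels.map (fun l => if l = PySem.List.pyGetD labels p 0 then PySem.List.pyGetD labels q 0 else l)
       else labels) := by
  obtain ⟨good, hplen, hllen, hiff⟩ := inv
  have hp' : PySem.Raise.InRange parent.length p := by rw [hplen]; exact hp
  have hq' : PySem.Raise.InRange parent.length q := by rw [hplen]; exact hq
  have hpl : PySem.Raise.InRange labels.length p := by rw [hllen]; exact hp
  have hql : PySem.Raise.InRange labels.length q := by rw [hllen]; exact hq
  set ip := nidx n p with hip
  set iq := nidx n q with hiq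
  have hiplt : ip < n := nidx_lt hp
  have hiqlt : iq < n := nidx_lt hq
  have hgp : PySem.List.pyGetD labels p 0 = labels.getD ip 0 := by
    rw [pyGetD_nidx labels p 0 hpl, hllen]
  have hgq : PySem.List.pyGetD labels q 0 = labels.getD iq 0 := by
    rw [pyGetD_nidx labels q 0 hql, hllen]
  have huspec := union_spec parent p q good hp' hq'
  have hnx : nidx parent.length p = ip := by rw [hplen]
  have hny : nidx parent.length q = iq := by rw [hplen]
  rw [hnx, hny] at huspec
  have hulen : (solveUnion parent p q).length = n := by rw [huspec.2.1, hplen]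
  have hroots : ∀ j, j < n → proot (solveUnion parent p q) j =
      if proot parent j = proot parent ip then proot parent iq else proot parent j := by
    intro j hj
    exact huspec.2.2 j (by rw [hplen]; exact hj)
  by_cases hcond : PySem.List.pyGetD labels p 0 ≠ PySem.List.pyGetD labels q 0
  · rw [if_pos hcond]
    refine ⟨huspec.1, hulen, by simpa using hllen, ?_⟩
    intro i j hi hj
    have hilab : i < labels.length := by rw [hllen]; exact hi
    have hjlab : j < labels.length := by rw [hllen]; exact hj
    rw [hroots i hi, hroots j hj, labels_map_getD labels _ _ i hilab,
      labels_map_getD labels _ _ j hjlab, hgp, hgq]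
    exact merge_iff (proot parent ip) (labels.getD ip 0) (labels.getD iq 0)
      (proot parent i) (proot parent j) (proot parent iq) (labels.getD i 0) (labels.getD j 0)
      (hiff i j hi hj) (hiff i ip hi hiplt) (hiff i iq hi hiqlt)
      (hiff j ip hj hiplt) (hiff j iq hj hiqlt)
  · rw [if_neg hcond]
    have heqlab : labels.getD ip 0 = labels.getD iq 0 := by
      rw [← hgp, ← hgq]
      by_contra hne
      exact hcond hne
    have heqr : proot parent ip = proot parent iq := (hiff ip iq hiplt hiqlt).mpr heqlab
    refine ⟨huspec.1, hulen, hllen, ?_⟩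
    intro i j hi hj
    rw [hroots i hi, hroots j hj, ← heqr]
    have hfi : (if proot parent i = proot parent ip then proot parent ip else proot parent i) = proot parent i := by
      split <;> omega
    have hfj : (if proot parent j = proot parent ip then proot parent ip else proot parent j) = proot parent j := by
      split <;> omega
    rw [hfi, hfj]
    exact hiff i j hi hj

theorem swaps_fold_inv (n : Nat) (swaps : List (List Int))
    (hpre : ∀ row ∈ swaps, row.length = 2 ∧ ∀ x ∈ row, PySem.Raise.InRange n x) :
    ∀ parent labels, InvPL n parent labels →
    InvPL n
      (swaps.foldl (fun parent row => match row with
        | [p, q] => solveUnion parent p q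
        | _ => parent) parent)
      (swaps.foldl (fun labels row => match row with
        | p :: rest =>
          match rest with
          | q :: rest2 =>
            match rest2 with
            | [] =>
              let lp := PySem.List.pyGetD labels p 0
              let lq := PySem.List.pyGetD labels q 0
              if lp ≠ lq then labels.map (fun l => if l = lp then lq else l) else labels
            | _ :: _ => labels
          | [] => labels
        | [] => labels) labels) := by
  induction swaps with
  | nil => intro parent labels inv; simpa using inv
  | cons row rows ih =>
    intro parent labels inv
    have hrow := hpre row (List.mem_cons_self)
    rcases row with _ | ⟨p, _ | ⟨q, _ | ⟨r, rest⟩⟩⟩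
    · simp at hrow
    · simp at hrow
    · rw [List.foldl_cons, List.foldl_cons]
      have hp : PySem.Raise.InRange n p := hrow.2 p (by simp)
      have hq : PySem.Raise.InRange n q := hrow.2 q (by simp)
      exact ih (fun r hr => hpre r (List.mem_cons_of_mem _ hr)) _ _ (inv_step n parent labels p q inv hp hq)
    · have := hrow.1
      simp at this
theorem inv_init (n : Nat) : InvPL n (PySem.List.pyRange 0 (n : Int) 1) (PySem.List.pyRange 0 (n : Int) 1) := by
  have hlen : (PySem.List.pyRange 0 (n : Int) 1).length = n := by
    rw [PySem.List.length_pyRange_one]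
    omega
  have hget : ∀ j, j < n → (PySem.List.pyRange 0 (n : Int) 1).getD j 0 = (j : Int) := by
    intro j hj
    have hj' : j < (PySem.List.pyRange 0 (n : Int) 1).length := by rw [hlen]; exact hj
    rw [List.getD_eq_getElem _ _ hj', PySem.List.getElem_pyRange_one]
    omega
  have hstep : ∀ j, j < n → pstep (PySem.List.pyRange 0 (n : Int) 1) j = j := by
    intro j hj
    unfold pstep
    rw [hget j hj]
    simp
  have hroot : ∀ j, j < n → proot (PySem.List.pyRange 0 (n : Int) 1) j = j := by
    intro j hj
    exact proot_of_fix (hstep j hj)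
  refine ⟨⟨?_, ?_⟩, hlen, hlen, ?_⟩
  · intro j hj
    rw [hlen] at hj
    exact ⟨j, by rw [hlen]; exact hj, hget j hj⟩
  · intro j hj
    rw [hlen] at hj
    rw [hroot j hj]
    exact hstep j hj
  · intro i j hi hj
    rw [hroot i hi, hroot j hj, hget i hi, hget j hj]
    omega
-- Layer 7: A's grouping loop only reads roots (compression does not change them)
theorem groupA_fold : ∀ (l : List (Int × Int)) (parent : List Int) (d : PySem.Dict Int (List Int)),
    Goodp parent →
    (∀ iv ∈ l, 0 ≤ iv.1 ∧ iv.1 < (parent.length : Int)) →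
    (l.foldl (fun (st : List Int × PySem.Dict Int (List Int)) iv =>
        let f := solveFind (st.1.length + 1) st.1 iv.1
        (f.2, st.2.modify f.1 [] (· ++ [iv.2]))) (parent, d)).2
    = l.foldl (fun d iv =>
        d.modify ((proot parent iv.1.toNat : Nat) : Int) [] (· ++ [iv.2])) d := by
  intro l
  induction l with
  | nil => intro parent d _ _; rfl
  | cons iv tl ih =>
    intro parent d good hb
    have hiv := hb iv (List.mem_cons_self)
    have hivr : PySem.Raise.InRange parent.length iv.1 := ⟨by omega, hiv.2⟩
    have hf := find_spec_int parent iv.1 good hivr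
    have hnid : nidx parent.length iv.1 = iv.1.toNat := by
      unfold nidx; rw [if_pos hiv.1]
    rw [hnid] at hf
    rw [List.foldl_cons, List.foldl_cons]
    set f := solveFind (parent.length + 1) parent iv.1 with hfdef
    conv_lhs => change (List.foldl (fun (st : List Int × PySem.Dict Int (List Int)) iv =>
        let f := solveFind (st.1.length + 1) st.1 iv.1
        (f.2, st.2.modify f.1 [] (· ++ [iv.2]))) (f.2, d.modify f.1 [] (· ++ [iv.2])) tl).2
    have hblen : ∀ iv' ∈ tl, 0 ≤ iv'.1 ∧ iv'.1 < (f.2.length : Int) := by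
      intro iv' hm
      have := hb iv' (List.mem_cons_of_mem _ hm)
      rw [hf.2.2.1]
      exact this
    rw [ih f.2 (d.modify f.1 [] (· ++ [iv.2])) hf.2.1 hblen]
    have hkey : ∀ iv' ∈ tl, ∀ (dd : PySem.Dict Int (List Int)),
        dd.modify ((proot f.2 iv'.1.toNat : Nat) : Int) [] (· ++ [iv'.2])
          = dd.modify ((proot parent iv'.1.toNat : Nat) : Int) [] (· ++ [iv'.2]) := by
      intro iv' hm dd
      have hlt : iv'.1.toNat < parent.length := by
        have := hb iv' (List.mem_cons_of_mem _ hm)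
        omega
      rw [hf.2.2.2 iv'.1.toNat hlt]
    rw [hf.1]
    exact PySem.List.foldl_congr_mem tl _ _ _ (fun dd iv' hm => hkey iv' hm dd)

-- Layer 8: values of a grouping dict, and their invariance under a
-- partition-equivalent change of keys
theorem dict_values_group (e : List (Int × Int)) :
    (e.foldl (fun d kv => d.modify kv.1 [] (· ++ [kv.2])) PySem.Dict.empty).values
    = (PySem.Set.ofList (e.map (·.1))).map
        (fun c => (e.filter (fun kv => kv.1 == c)).map (·.2)) := by
  have hnd : (e.foldl (fun d kv => d.modify kv.1 [] (· ++ [kv.2])) PySem.Dict.empty).keys.Nodup := by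
    have := PySem.Dict.nodup_keys_foldl_modify_key e (fun kv => kv.1) []
      (fun _ kv => (· ++ [kv.2])) PySem.Dict.empty (by simp [PySem.Dict.keys_empty])
    exact this
  have hkeys : (e.foldl (fun d kv => d.modify kv.1 [] (· ++ [kv.2])) PySem.Dict.empty).keys
      = PySem.Set.ofList (e.map (·.1)) := by
    have := PySem.Dict.keys_foldl_modify_key e (fun kv => kv.1) []
      (fun _ kv => (· ++ [kv.2])) PySem.Dict.empty
    rw [this]
    rw [show PySem.Dict.empty.keys = (PySem.Set.empty : PySem.Set Int) from rfl, PySem.Set.update_empty]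
  rw [PySem.Dict.values_eq_map_keys _ hnd [], hkeys]
  apply List.map_congr_left
  intro c hc
  rw [PySem.Dict.getD_foldl_modify_append, PySem.Dict.getD_empty]
  simp

theorem mem_iff_getD (l : List Int) (a : Int) : a ∈ l ↔ ∃ u, u < l.length ∧ l.getD u 0 = a := by
  constructor
  · intro h
    obtain ⟨u, hu, he⟩ := List.mem_iff_getElem.mp h
    exact ⟨u, hu, by rw [List.getD_eq_getElem _ _ hu, he]⟩
  · rintro ⟨u, hu, he⟩
    rw [List.getD_eq_getElem _ _ hu] at he
    exact he ▸ List.getElem_mem hu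

theorem getD_concat_length (l : List Int) (a : Int) : (l ++ [a]).getD l.length 0 = a := by
  rw [List.getD_eq_getElem?_getD, List.getElem?_concat_length]
  rfl

theorem corr_pos : ∀ (vals kA kB : List Int),
    kA.length = vals.length → kB.length = vals.length →
    (∀ u v, u < vals.length → v < vals.length →
      (kA.getD u 0 = kA.getD v 0 ↔ kB.getD u 0 = kB.getD v 0)) →
    (PySem.Set.ofList kA).length = (PySem.Set.ofList kB).length ∧
    ∀ m, m < (PySem.Set.ofList kA).length → ∀ u, u < vals.length →
      (kA.getD u 0 = (PySem.Set.ofList kA).getD m 0 ↔ kB.getD u 0 = (PySem.Set.ofList kB).getD m 0) := by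
  intro vals
  induction vals using List.reverseRecOn with
  | nil =>
    intro kA kB hA hB _
    rw [List.eq_nil_of_length_eq_zero hA, List.eq_nil_of_length_eq_zero hB]
    exact ⟨rfl, by intro m hm; simp [PySem.Set.ofList] at hm⟩
  | append_singleton vs w ih =>
    intro kA kB hA hB hpart
    rcases List.eq_nil_or_concat kA with rfl | ⟨kA', a, rfl⟩
    · simp at hA
    rcases List.eq_nil_or_concat kB with rfl | ⟨kB', b, rfl⟩
    · simp at hB
    simp only [List.concat_eq_append] at hA hB hpart ⊢
    have hA' : kA'.length = vs.length := by simpa using hA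
    have hB' : kB'.length = vs.length := by simpa using hB
    have hgA : ∀ u, u < vs.length → (kA' ++ [a]).getD u 0 = kA'.getD u 0 := by
      intro u hu; exact List.getD_append _ _ _ u (by omega)
    have hgB : ∀ u, u < vs.length → (kB' ++ [b]).getD u 0 = kB'.getD u 0 := by
      intro u hu; exact List.getD_append _ _ _ u (by omega)
    have hgAl : (kA' ++ [a]).getD vs.length 0 = a := by
      rw [← hA']; exact getD_concat_length kA' a
    have hgBl : (kB' ++ [b]).getD vs.length 0 = b := by
      rw [← hB']; exact getD_concat_length kB' b
    have hpart' : ∀ u v, u < vs.length → v < vs.length →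
        (kA'.getD u 0 = kA'.getD v 0 ↔ kB'.getD u 0 = kB'.getD v 0) := by
      intro u v hu hv
      have := hpart u v (by simp; omega) (by simp; omega)
      rwa [hgA u hu, hgA v hv, hgB u hu, hgB v hv] at this
    obtain ⟨ihlen, ihpos⟩ := ih kA' kB' hA' hB' hpart'
    have hain : a ∈ kA' ↔ b ∈ kB' := by
      constructor
      · intro ha
        obtain ⟨u0, hu0, he0⟩ := (mem_iff_getD kA' a).mp ha
        have hu0' : u0 < vs.length := by omega
        have := hpart u0 vs.length (by simp; omega) (by simp)
        rw [hgA u0 hu0', hgAl, hgB u0 hu0', hgBl, he0] at this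
        exact (mem_iff_getD kB' b).mpr ⟨u0, by omega, this.mp rfl⟩
      · intro hbm
        obtain ⟨u0, hu0, he0⟩ := (mem_iff_getD kB' b).mp hbm
        have hu0' : u0 < vs.length := by omega
        have := hpart u0 vs.length (by simp; omega) (by simp)
        rw [hgA u0 hu0', hgAl, hgB u0 hu0', hgBl, he0] at this
        exact (mem_iff_getD kA' a).mpr ⟨u0, by omega, this.mpr rfl⟩
    rw [PySem.Set.ofList_append_singleton, PySem.Set.ofList_append_singleton]
    by_cases ha : a ∈ kA'
    · have hbm : b ∈ kB' := hain.mp ha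
      rw [PySem.Set.add_of_mem ((PySem.Set.mem_ofList _ _).mpr ha),
        PySem.Set.add_of_mem ((PySem.Set.mem_ofList _ _).mpr hbm)]
      refine ⟨ihlen, ?_⟩
      intro m hm u hu
      obtain ⟨u0, hu0, he0⟩ := (mem_iff_getD kA' a).mp ha
      have hu0' : u0 < vs.length := by omega
      have hb0 : kB'.getD u0 0 = b := by
        have := hpart u0 vs.length (by simp; omega) (by simp)
        rw [hgA u0 hu0', hgAl, hgB u0 hu0', hgBl, he0] at this
        exact this.mp rfl
      rcases Nat.lt_or_ge u vs.length with hu' | hu'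
      · have := ihpos m hm u hu'
        rw [hgA u hu', hgB u hu']
        exact this
      · have huv : u = vs.length := by simp at hu; omega
        subst huv
        rw [hgAl, hgBl, ← he0, ← hb0]
        exact ihpos m hm u0 hu0'
    · have hbm : b ∉ kB' := fun h => ha (hain.mpr h)
      rw [PySem.Set.add_of_not_mem (fun h => ha ((PySem.Set.mem_ofList _ _).mp h)),
        PySem.Set.add_of_not_mem (fun h => hbm ((PySem.Set.mem_ofList _ _).mp h))]
      have hlenA2 : (PySem.Set.ofList kA' ++ [a]).length = (PySem.Set.ofList kA').length + 1 := by simp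
      refine ⟨by simp [ihlen], ?_⟩
      intro m hm u hu
      rcases Nat.lt_or_ge m (PySem.Set.ofList kA').length with hm' | hm'
      · have hmB : m < (PySem.Set.ofList kB').length := by omega
        have hsA : (PySem.Set.ofList kA' ++ [a]).getD m 0 = (PySem.Set.ofList kA').getD m 0 :=
          List.getD_append _ _ _ m hm'
        have hsB : (PySem.Set.ofList kB' ++ [b]).getD m 0 = (PySem.Set.ofList kB').getD m 0 :=
          List.getD_append _ _ _ m hmB
        rw [hsA, hsB]
        rcases Nat.lt_or_ge u vs.length with hu' | hu'
        · rw [hgA u hu', hgB u hu']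
          exact ihpos m hm' u hu'
        · have huv : u = vs.length := by simp at hu; omega
          subst huv
          rw [hgAl, hgBl]
          have hamem : (PySem.Set.ofList kA').getD m 0 ∈ kA' := by
            have : (PySem.Set.ofList kA').getD m 0 ∈ PySem.Set.ofList kA' :=
              (mem_iff_getD _ _).mpr ⟨m, hm', rfl⟩
            exact (PySem.Set.mem_ofList _ _).mp this
          have hbmem : (PySem.Set.ofList kB').getD m 0 ∈ kB' := by
            have : (PySem.Set.ofList kB').getD m 0 ∈ PySem.Set.ofList kB' :=
              (mem_iff_getD _ _).mpr ⟨m, hmB, rfl⟩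
            exact (PySem.Set.mem_ofList _ _).mp this
          constructor
          · intro h; exact absurd (h ▸ hamem) ha
          · intro h; exact absurd (h ▸ hbmem) hbm
      · have hmA : m = (PySem.Set.ofList kA').length := by
          rw [hlenA2] at hm; omega
        have hsA : (PySem.Set.ofList kA' ++ [a]).getD m 0 = a := by
          rw [hmA]; exact getD_concat_length _ _
        have hsB : (PySem.Set.ofList kB' ++ [b]).getD m 0 = b := by
          rw [hmA, ihlen]; exact getD_concat_length _ _
        rw [hsA, hsB]
        rcases Nat.lt_or_ge u vs.length with hu' | hu'
        · rw [hgA u hu', hgB u hu']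
          have := hpart u vs.length (by simp; omega) (by simp)
          rwa [hgA u hu', hgAl, hgB u hu', hgBl] at this
        · have huv : u = vs.length := by simp at hu; omega
          subst huv
          rw [hgAl, hgBl]
          simp

theorem filter_zip_snd : ∀ (vals kA kB : List Int),
    kA.length = vals.length → kB.length = vals.length →
    ∀ (cA cB : Int), (∀ u, u < vals.length → (kA.getD u 0 = cA ↔ kB.getD u 0 = cB)) →
    ((kA.zip vals).filter (fun kv => kv.1 == cA)).map (·.2)
      = ((kB.zip vals).filter (fun kv => kv.1 == cB)).map (·.2) := by
  intro vals
  induction vals with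
  | nil =>
    intro kA kB hA hB cA cB _
    rw [List.eq_nil_of_length_eq_zero hA, List.eq_nil_of_length_eq_zero hB]
    rfl
  | cons w vs ih =>
    intro kA kB hA hB cA cB h
    rcases kA with _ | ⟨a, kA'⟩
    · simp at hA
    rcases kB with _ | ⟨b, kB'⟩
    · simp at hB
    have h0 := h 0 (by simp)
    simp only [List.getD_cons_zero] at h0
    have htail : ∀ u, u < vs.length → (kA'.getD u 0 = cA ↔ kB'.getD u 0 = cB) := by
      intro u hu
      have := h (u + 1) (by simp; omega)
      simpa using this
    have ihv := ih kA' kB' (by simpa using hA) (by simpa using hB) cA cB htail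
    rw [List.zip_cons_cons, List.zip_cons_cons]
    by_cases hc : a = cA
    · rw [List.filter_cons_of_pos (by simpa using hc),
        List.filter_cons_of_pos (by simpa using h0.mp hc)]
      simpa using ihv
    · rw [List.filter_cons_of_neg (by simpa using hc),
        List.filter_cons_of_neg (by simpa using fun hh => hc (h0.mpr hh))]
      exact ihv

theorem corr_values (vals kA kB : List Int)
    (hA : kA.length = vals.length) (hB : kB.length = vals.length)
    (hpart : ∀ u v, u < vals.length → v < vals.length →
      (kA.getD u 0 = kA.getD v 0 ↔ kB.getD u 0 = kB.getD v 0)) :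
    (PySem.Set.ofList kA).map
        (fun c => ((kA.zip vals).filter (fun kv => kv.1 == c)).map (·.2))
      = (PySem.Set.ofList kB).map
        (fun c => ((kB.zip vals).filter (fun kv => kv.1 == c)).map (·.2)) := by
  obtain ⟨hlen, hpos⟩ := corr_pos vals kA kB hA hB hpart
  apply List.ext_getElem (by simpa using hlen)
  intro m h1 h2
  simp only [List.getElem_map]
  have hmA : m < (PySem.Set.ofList kA).length := by simpa using h1
  have hmB : m < (PySem.Set.ofList kB).length := by simpa using h2
  apply filter_zip_snd vals kA kB hA hB
  intro u hu
  have := hpos m hmA u hu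
  rwa [List.getD_eq_getElem _ _ hmA, List.getD_eq_getElem _ _ hmB] at this
-- Layer 9: per-group alternating sums
def pvEvens : List Int → List Int
  | [] => []
  | [v] => [v]
  | v :: _ :: t => v :: pvEvens t

def pvOdds (l : List Int) : List Int := pvEvens l.tail

def pvAlt : List Int → Int
  | [] => 0
  | v :: t => v - pvAlt t

theorem pvEvens_cons (w : Int) (t : List Int) : pvEvens (w :: t) = w :: pvOdds t := by
  cases t <;> rfl

theorem evens_eq : ∀ s : List Int,
    (List.range ((s.length + 1) / 2)).map (fun k => s.getD (2 * k) 0) = pvEvens s := by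
  intro s
  induction s using pvEvens.induct with
  | case1 => rfl
  | case2 v => simp [pvEvens]
  | case3 v w t ih =>
    have hc : ((v :: w :: t).length + 1) / 2 = (t.length + 1) / 2 + 1 := by
      simp only [List.length_cons]
      omega
    rw [hc, List.range_succ_eq_map, List.map_cons, List.map_map]
    show (v :: w :: t).getD 0 0 :: _ = pvEvens (v :: w :: t)
    have hmap : ∀ k, ((fun k => (v :: w :: t).getD (2 * k) 0) ∘ (· + 1)) k
        = (fun k => t.getD (2 * k) 0) k := by
      intro k
      show (v :: w :: t).getD (2 * (k + 1)) 0 = t.getD (2 * k) 0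
      rw [show 2 * (k + 1) = (2 * k) + 1 + 1 by omega]
      rw [List.getD_cons_succ, List.getD_cons_succ]
    rw [List.map_congr_left (fun k _ => hmap k), ih]
    rfl

theorem odds_eq : ∀ s : List Int,
    (List.range (s.length / 2)).map (fun k => s.getD (2 * k + 1) 0) = pvOdds s := by
  intro s
  cases s with
  | nil => rfl
  | cons v t =>
    unfold pvOdds
    rw [List.tail_cons]
    rw [show (v :: t).length / 2 = (t.length + 1) / 2 by simp]
    rw [← evens_eq t]
    apply List.map_congr_left
    intro k _
    show (v :: t).getD (2 * k + 1) 0 = t.getD (2 * k) 0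
    rw [List.getD_cons_succ]

theorem alt_eq : ∀ s : List Int, (pvEvens s).sum - (pvOdds s).sum = pvAlt s := by
  intro s
  induction s using pvEvens.induct with
  | case1 => rfl
  | case2 v => show v + 0 - 0 = v - 0; omega
  | case3 v w t ih =>
    show (v :: pvEvens t).sum - (pvEvens (w :: t)).sum = v - pvAlt (w :: t)
    rw [pvEvens_cons, List.sum_cons, List.sum_cons]
    show v + (pvEvens t).sum - (w + (pvOdds t).sum) = v - (w - pvAlt t)
    omega

theorem oddsum_short (s : List Int) (h : ¬ 1 < s.length) : (pvOdds s).sum = 0 := by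
  rcases s with _ | ⟨v, _ | ⟨w, t⟩⟩
  · rfl
  · rfl
  · simp at h

theorem foldB_alt : ∀ (s : List Int) (acc sg : Int),
    (s.foldl (fun (p : Int × Int) v => (p.1 + p.2 * v, -p.2)) (acc, sg)).1
      = acc + sg * pvAlt s := by
  intro s
  induction s with
  | nil => intro acc sg; show acc = acc + sg * 0; ring
  | cons v t ih =>
    intro acc sg
    rw [List.foldl_cons]
    show (t.foldl (fun (p : Int × Int) v => (p.1 + p.2 * v, -p.2)) (acc + sg * v, -sg)).1
      = acc + sg * pvAlt (v :: t)
    rw [ih]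
    show acc + sg * v + -sg * pvAlt t = acc + sg * (v - pvAlt t)
    ring

-- bridge: A's even/odd index comprehensions are pvEvens/pvOdds of the list
theorem rangeA_evens (g : List Int) :
    ((PySem.List.pyRange 0 (PySem.List.len g) 2).map (fun i => PySem.List.pyGetD g i 0)).sum
      = (pvEvens g).sum := by
  rw [PySem.List.len_eq, PySem.List.pyRange_of_pos 0 (g.length : Int) (by norm_num)]
  rcases Nat.eq_zero_or_pos g.length with hz | hpos
  · rw [hz]
    norm_num
    rcases g with _ | _
    · rfl
    · simp at hz
  · rw [if_pos (by exact_mod_cast hpos)]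
    have hcnt : (((g.length : Int) - 0 + 2 - 1) / 2).toNat = (g.length + 1) / 2 := by
      omega
    rw [hcnt, List.map_map, ← evens_eq g]
    congr 1
    apply List.map_congr_left
    intro k _
    show PySem.List.pyGetD g ((0 : Int) + 2 * (k : Int)) 0 = g.getD (2 * k) 0
    rw [show (0 : Int) + 2 * (k : Int) = ((2 * k : Nat) : Int) by push_cast; ring,
      PySem.List.pyGetD_natCast]

theorem rangeA_odds (g : List Int) :
    ((PySem.List.pyRange 1 (PySem.List.len g) 2).map (fun i => PySem.List.pyGetD g i 0)).sum
      = (pvOdds g).sum := by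
  rw [PySem.List.len_eq, PySem.List.pyRange_of_pos 1 (g.length : Int) (by norm_num)]
  rcases Nat.lt_or_ge g.length 2 with hz | hpos
  · have hle : ¬ ((1 : Int) < (g.length : Int)) := by omega
    rw [if_neg hle]
    rw [oddsum_short g (by omega)]
    rfl
  · rw [if_pos (by omega : (1 : Int) < (g.length : Int))]
    have hcnt : (((g.length : Int) - 1 + 2 - 1) / 2).toNat = g.length / 2 := by
      omega
    rw [hcnt, List.map_map, ← odds_eq g]
    congr 1
    apply List.map_congr_left
    intro k _
    show PySem.List.pyGetD g ((1 : Int) + 2 * (k : Int)) 0 = g.getD (2 * k + 1) 0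
    rw [show (1 : Int) + 2 * (k : Int) = ((2 * k + 1 : Nat) : Int) by push_cast; ring,
      PySem.List.pyGetD_natCast]

-- one group's contribution, both ways
theorem contrib_eq (acc : Int) (group : List Int) :
    (let g := PySem.List.sorted group (fun v => v) true
     let acc1 := acc + ((PySem.List.pyRange 0 (PySem.List.len g) 2).map
        (fun i => PySem.List.pyGetD g i 0)).sum
     if 1 < g.length then
       acc1 - ((PySem.List.pyRange 1 (PySem.List.len g) 2).map
         (fun i => PySem.List.pyGetD g i 0)).sum
     else acc1)
    = ((PySem.List.sorted group (fun v => v) true).foldl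
        (fun (p : Int × Int) v => (p.1 + p.2 * v, -p.2)) (acc, 1)).1 := by
  rw [foldB_alt]
  show (if 1 < (PySem.List.sorted group (fun v => v) true).length
    then acc + _ - _ else acc + _) = _
  set g := PySem.List.sorted group (fun v => v) true with hg
  rw [rangeA_evens g, rangeA_odds g]
  by_cases hlen : 1 < g.length
  · rw [if_pos hlen, ← alt_eq g]
    ring
  · rw [if_neg hlen, ← alt_eq g, oddsum_short g hlen]
    ring
-- Layer 10: assembling the equivalence
theorem zip_fst_snd {α β : Type} : ∀ (l : List (α × β)), (l.map (·.1)).zip (l.map (·.2)) = l := by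
  intro l
  induction l with
  | nil => rfl
  | cons x t ih => simp [List.zip_cons_cons, ih]

-- ===== VERDICT (by name: the statement is the Claim_ definition above) =====
theorem solve_spec : Claim_equal_solve := by
  intro nums swaps _hdom hpre
  unfold Spec_solve
  simp only [solve, solve_alt]
  -- the invariant after the swaps loop
  have hinv := swaps_fold_inv nums.length swaps hpre
    (PySem.List.pyRange 0 (nums.length : Int) 1) (PySem.List.pyRange 0 (nums.length : Int) 1)
    (inv_init nums.length)
  set parentF := swaps.foldl (fun parent row => match row with
    | [p, q] => solveUnion parent p q
    | _ => parent) (PySem.List.pyRange 0 (nums.length : Int) 1) with hparentF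
  set labelsF := swaps.foldl (fun labels row => match row with
    | p :: rest =>
      match rest with
      | q :: rest2 =>
        match rest2 with
        | [] =>
          let lp := PySem.List.pyGetD labels p 0
          let lq := PySem.List.pyGetD labels q 0
          if lp ≠ lq then labels.map (fun l => if l = lp then lq else l) else labels
        | _ :: _ => labels
      | [] => labels
    | [] => labels) (PySem.List.pyRange 0 (nums.length : Int) 1) with hlabelsF
  obtain ⟨goodF, hplen, hllen, hiff⟩ := hinv
  -- A's grouping loop, reduced to a pure grouping over the (fixed) roots
  have hb : ∀ iv ∈ PySem.List.enumerate nums, 0 ≤ iv.1 ∧ iv.1 < (parentF.length : Int) := by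
    intro iv hm
    obtain ⟨k, hk, rfl⟩ := (PySem.List.mem_enumerate_iff _ _ _).mp hm
    constructor
    · simp
    · simp only [hplen]
      simp
      omega
  have hA2 := groupA_fold (PySem.List.enumerate nums) parentF PySem.Dict.empty goodF hb
  rw [hA2]
  -- reshape both grouping folds over explicit key/value pair lists
  set eA := (PySem.List.enumerate nums).map
    (fun iv => (((proot parentF iv.1.toNat : Nat) : Int), iv.2)) with heA
  have hAe : (PySem.List.enumerate nums).foldl
      (fun d iv => d.modify ((proot parentF iv.1.toNat : Nat) : Int) [] (· ++ [iv.2]))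
      PySem.Dict.empty
      = eA.foldl (fun d kv => d.modify kv.1 [] (· ++ [kv.2])) PySem.Dict.empty := by
    rw [heA, List.foldl_map]
  rw [hAe]
  set eB := labelsF.zip nums with heB
  have hBfold : (fun (d : PySem.Dict Int (List Int)) (kv : Int × Int) =>
      d.insert kv.1 (d.getD kv.1 [] ++ [kv.2]))
      = (fun (d : PySem.Dict Int (List Int)) (kv : Int × Int) =>
        d.modify kv.1 [] (· ++ [kv.2])) := rfl
  rw [hBfold]
  rw [dict_values_group eA, dict_values_group eB]
  -- the two grouping value lists are equal
  have heA2 : eA.map (·.2) = nums := by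
    rw [heA, List.map_map]
    exact PySem.List.map_snd_enumerate nums 0
  have heB1 : eB.map (·.1) = labelsF := by
    rw [heB]
    exact List.map_fst_zip (by omega)
  have hzipA : (eA.map (·.1)).zip nums = eA := by
    conv_lhs => rw [← heA2]
    exact zip_fst_snd eA
  have hlenA : (eA.map (·.1)).length = nums.length := by
    rw [heA]
    simp [PySem.List.length_enumerate]
  have hgetA : ∀ u, u < nums.length → (eA.map (·.1)).getD u 0 = ((proot parentF u : Nat) : Int) := by
    intro u hu
    rw [List.getD_eq_getElem?_getD, List.getElem?_map, heA, List.getElem?_map,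
      PySem.List.getElem?_enumerate, List.getElem?_eq_getElem hu]
    simp
  have hgetB : labelsF.length = nums.length := hllen
  have hpart : ∀ u v, u < nums.length → v < nums.length →
      ((eA.map (·.1)).getD u 0 = (eA.map (·.1)).getD v 0 ↔ labelsF.getD u 0 = labelsF.getD v 0) := by
    intro u v hu hv
    rw [hgetA u hu, hgetA v hv]
    rw [show (((proot parentF u : Nat) : Int) = ((proot parentF v : Nat) : Int)) ↔ proot parentF u = proot parentF v by exact_mod_cast Iff.rfl]
    exact hiff u v hu hv
  have hvals := corr_values nums (eA.map (·.1)) labelsF hlenA hgetB hpart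
  rw [hzipA, ← heB] at hvals
  rw [heB1, hvals]
  -- identical per-group contributions
  exact PySem.List.foldl_congr_mem _ _ _ _ (fun acc group _ => contrib_eq acc group)
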